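-- pv_equiv track=rewrite | github.com/LuoXueling/ComputationalKinematicsDynamicsOfMechanicalSystems | Kinematics/KinematicsPython/plot.py | pathPreProcess
-- ===== SOURCE A (Python) =====
-- def pathPreProcess(inpFilePath):
--     # 字符串预处理
--     st = inpFilePath.replace("\\", "/")
--     st = st.split("/")
--     root = ""
--     for part in range(len(st) - 1):
--         root += (st[part])
--         root += (r"/")
--     # 含后缀名
--     filename = st[-1]
--     # 不含后缀名
--     inpname = filename.split(".")[0]
--     return root, filename, inpname
-- ===== SOURCE B (Python) =====
-- def pathPreProcess(inpFilePath):
--     # single forward pass over the characters; no split list, no prefix rebuilding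
--     root_chars = []
--     name_chars = []
--     for ch in inpFilePath:
--         if ch == '\\' or ch == '/':
--             root_chars += name_chars
--             root_chars.append('/')
--             name_chars = []
--         else:
--             name_chars.append(ch)
--     inp_chars = []
--     for ch in name_chars:
--         if ch == '.':
--             break
--         inp_chars.append(ch)
--     return ''.join(root_chars), ''.join(name_chars), ''.join(inp_chars)
-- ===== Notes on version B (the rewrite author's own statement) =====
-- stated objective: alternative
-- what changed: B makes one forward character-level scan with two accumulators (root so far, current segment), treating backslash and forward slash as separators on the fly, instead of A's replace-then-split-into-a-list-then-loop-concatenate-the-prefix; the extension-free name is cut at the first dot by a second small scan instead of splitting on the dot and taking the first piece.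
import Mathlib
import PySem

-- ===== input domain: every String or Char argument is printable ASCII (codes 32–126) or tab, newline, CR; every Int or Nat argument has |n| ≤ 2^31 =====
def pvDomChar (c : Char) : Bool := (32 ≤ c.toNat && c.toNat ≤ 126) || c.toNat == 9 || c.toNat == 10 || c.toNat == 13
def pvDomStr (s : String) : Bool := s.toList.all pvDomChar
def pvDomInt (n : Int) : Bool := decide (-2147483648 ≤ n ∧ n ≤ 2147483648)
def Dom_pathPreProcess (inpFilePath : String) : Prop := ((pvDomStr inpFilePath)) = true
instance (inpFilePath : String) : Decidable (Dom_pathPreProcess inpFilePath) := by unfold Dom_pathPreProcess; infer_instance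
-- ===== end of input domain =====

-- B replaces A's replace/split/loop-concatenate pipeline by one forward character scan with two accumulators.

-- ===== PORT A =====
def pathPreProcess (inpFilePath : String) : String × String × String :=
  let st := PySem.Str.replace inpFilePath "\\" "/"
  let parts := (PySem.Str.split? st "/").getD []
  let root := (PySem.List.pyRange 0 ((parts.length : Int) - 1) 1).foldl
      (fun r i => r ++ (PySem.List.pyGet? parts i).getD "" ++ "/") ""
  let filename := (PySem.List.pyGet? parts (-1)).getD ""
  let inpname := (PySem.List.pyGet? ((PySem.Str.split? filename ".").getD []) 0).getD ""
  (root, filename, inpname)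

-- ===== PORT B =====
/-- B's main loop: one pass, accumulating the root chars and the current (last) segment chars. -/
def pvScanB : List Char → List Char → List Char → List Char × List Char
  | [], root, name => (root, name)
  | c :: rest, root, name =>
    if c = '\\' ∨ c = '/' then pvScanB rest (root ++ name ++ ['/']) []
    else pvScanB rest root (name ++ [c])

/-- B's second loop: chars of the filename up to (not including) the first '.' (break). -/
def pvTakeB : List Char → List Char
  | [] => []
  | c :: rest => if c = '.' then [] else c :: pvTakeB rest

def pathPreProcess_alt (inpFilePath : String) : String × String × String :=
  let rn := pvScanB inpFilePath.toList [] []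
  (String.ofList rn.1, String.ofList rn.2, String.ofList (pvTakeB rn.2))

-- ===== PRECONDITION & SPEC =====
def Spec_pathPreProcess (inpFilePath : String) (out : String × String × String) : Prop := out = pathPreProcess_alt inpFilePath
instance (inpFilePath : String) (out : String × String × String) : Decidable (Spec_pathPreProcess inpFilePath out) := by unfold Spec_pathPreProcess; infer_instance

-- ===== CLAIM (what is proved, stated in full; the proofs are below) =====
def Claim_equal_pathPreProcess : Prop := ∀ (inpFilePath : String), Dom_pathPreProcess inpFilePath → Spec_pathPreProcess inpFilePath (pathPreProcess inpFilePath)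

-- ===== LEMMAS AND PROOFS =====

/-- Reference splitter on a single separator char (cur holds the current segment reversed). -/
def split1 (sep : Char) : List Char → List Char → List (List Char)
  | [], cur => [cur.reverse]
  | c :: rest, cur => if c = sep then cur.reverse :: split1 sep rest [] else split1 sep rest (c :: cur)

/-- Forward splitter on both raw separators, matching B's scan. -/
def split2 : List Char → List Char → List (List Char)
  | [], cur => [cur]
  | c :: rest, cur => if c = '\\' ∨ c = '/' then cur :: split2 rest [] else split2 rest (cur ++ [c])

def replC (c : Char) : Char := if c = '\\' then '/' else c

theorem prefix_single (sep : Char) (xs : List Char) :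
    ([sep].isPrefixOf xs = true) ↔ ∃ t, xs = sep :: t := by
  cases xs with
  | nil => simp [List.isPrefixOf]
  | cons c t => simp [List.isPrefixOf]; exact eq_comm

theorem splitOn_go_eq (sep : Char) (fuel : Nat) : ∀ (l cur : List Char) (accs : List (List Char)),
    l.length ≤ fuel →
    PySem.Chars.splitOn.go [sep] fuel l cur accs = accs.reverse ++ split1 sep l cur := by
  induction fuel with
  | zero =>
    intro l cur accs h
    have hl : l = [] := List.length_eq_zero_iff.mp (Nat.le_zero.mp h)
    subst hl
    rw [PySem.Chars.splitOn.go]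
    simp [split1]
  | succ f ih =>
    intro l cur accs h
    cases l with
    | nil =>
      rw [PySem.Chars.splitOn.go]
      simp [split1]
      omega
    | cons c rest =>
      rw [PySem.Chars.splitOn.go]
      by_cases hc : c = sep
      · have hp : [sep].isPrefixOf (c :: rest) = true :=
          (prefix_single _ _).mpr ⟨rest, by rw [hc]⟩
        rw [if_pos hp]
        have hlen : rest.length ≤ f := by simpa using h
        simp only [List.length_singleton, List.drop_one, List.tail_cons]
        rw [ih rest [] (cur.reverse :: accs) hlen]
        simp [split1, hc]
      · have hp : ¬ ([sep].isPrefixOf (c :: rest) = true) := by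
          intro hcon
          obtain ⟨t, ht⟩ := (prefix_single _ _).mp hcon
          exact hc (List.cons_eq_cons.mp ht).1
        rw [if_neg hp]
        have hlen : rest.length ≤ f := by
          have := h; simp at this; omega
        rw [ih rest (c :: cur) accs hlen]
        simp [split1, hc]

theorem splitOn_eq (sep : Char) (l : List Char) :
    PySem.Chars.splitOn l [sep] = split1 sep l [] := by
  unfold PySem.Chars.splitOn
  rw [splitOn_go_eq sep (l.length + 1) l [] [] (by omega)]
  simp

theorem replace_go_eq (fuel : Nat) : ∀ (l acc : List Char), l.length ≤ fuel →
    PySem.Chars.replace.go ['\\'] ['/'] fuel l acc = acc.reverse ++ l.map replC := by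
  induction fuel with
  | zero =>
    intro l acc h
    have hl : l = [] := List.length_eq_zero_iff.mp (Nat.le_zero.mp h)
    subst hl
    rw [PySem.Chars.replace.go]
    simp
  | succ f ih =>
    intro l acc h
    cases l with
    | nil =>
      rw [PySem.Chars.replace.go]
      simp
      omega
    | cons c rest =>
      rw [PySem.Chars.replace.go]
      by_cases hc : c = '\\'
      · have hp : ['\\'].isPrefixOf (c :: rest) = true :=
          (prefix_single _ _).mpr ⟨rest, by rw [hc]⟩
        rw [if_pos hp]
        have hlen : rest.length ≤ f := by simpa using h
        simp only [List.length_singleton, List.drop_one, List.tail_cons]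
        rw [ih rest _ hlen]
        simp [replC, hc]
      · have hp : ¬ (['\\'].isPrefixOf (c :: rest) = true) := by
          intro hcon
          obtain ⟨t, ht⟩ := (prefix_single _ _).mp hcon
          exact hc (List.cons_eq_cons.mp ht).1
        rw [if_neg hp]
        have hlen : rest.length ≤ f := by
          have := h; simp at this; omega
        rw [ih rest (c :: acc) hlen]
        simp [replC, hc]

theorem replace_eq (l : List Char) :
    PySem.Chars.replace l ['\\'] ['/'] = l.map replC := by
  unfold PySem.Chars.replace
  rw [if_neg (by simp)]
  rw [replace_go_eq l.length l [] (le_refl _)]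
  simp

/-- The replaced-then-split-on-'/' segmentation equals the forward two-separator segmentation. -/
theorem split1_repl (l : List Char) : ∀ (cur : List Char),
    split1 '/' (l.map replC) cur = split2 l cur.reverse := by
  induction l with
  | nil => intro cur; simp [split1, split2]
  | cons c rest ih =>
    intro cur
    by_cases hsep : c = '\\' ∨ c = '/'
    · have hr : replC c = '/' := by rcases hsep with h | h <;> simp [replC, h]
      simp only [List.map_cons, hr, split1, split2, if_pos hsep]
      rw [ih []]
      rfl
    · have hc1 : c ≠ '\\' := fun h => hsep (Or.inl h)
      have hc2 : c ≠ '/' := fun h => hsep (Or.inr h)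
      have hr : replC c = c := by simp [replC, hc1]
      simp only [List.map_cons, hr, split1, if_neg hc2, split2, if_neg hsep]
      rw [ih (c :: cur)]
      simp

theorem split2_ne_nil (l : List Char) (cur : List Char) : split2 l cur ≠ [] := by
  induction l generalizing cur with
  | nil => simp [split2]
  | cons c rest ih => by_cases h : c = '\\' ∨ c = '/' <;> simp [split2, h, ih]

/-- B's scan computes the flattened dropLast and the last segment of split2. -/
theorem scanB_eq (l : List Char) : ∀ (root name : List Char),
    pvScanB l root name
      = (root ++ (split2 l name).dropLast.flatMap (· ++ ['/']), (split2 l name).getLast (split2_ne_nil l name)) := by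
  induction l with
  | nil => intro root name; simp [pvScanB, split2]
  | cons c rest ih =>
    intro root name
    by_cases h : c = '\\' ∨ c = '/'
    · simp only [pvScanB, if_pos h, split2]
      rw [ih]
      have hne := split2_ne_nil rest []
      rw [List.dropLast_cons_of_ne_nil hne, List.getLast_cons hne]
      simp
    · simp only [pvScanB, if_neg h, split2]
      rw [ih]

/-- Head of the '.'-split is B's take-until-dot. -/
theorem split1_dot_head (l : List Char) : ∀ (cur : List Char),
    ∃ t, split1 '.' l cur = (cur.reverse ++ pvTakeB l) :: t := by
  induction l with
  | nil => intro cur; exact ⟨[], by simp [split1, pvTakeB]⟩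
  | cons c rest ih =>
    intro cur
    by_cases hc : c = '.'
    · exact ⟨split1 '.' rest [], by simp [split1, pvTakeB, hc]⟩
    · obtain ⟨t, ht⟩ := ih (c :: cur)
      exact ⟨t, by simp [split1, pvTakeB, hc, ht]⟩

theorem fold_idx (ps : List String) : ∀ (n : Nat), n ≤ ps.length → ∀ (acc : String),
    (PySem.List.pyRange 0 (n : Int) 1).foldl
      (fun r i => r ++ (PySem.List.pyGet? ps i).getD "" ++ "/") acc
    = (ps.take n).foldl (fun r p => r ++ p ++ "/") acc := by
  intro n
  induction n with
  | zero =>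
    intro _ acc
    norm_num [PySem.List.pyRange_one_eq_nil (le_refl (0 : Int))]
  | succ n ih =>
    intro hn acc
    have hn' : n < ps.length := by omega
    have hget : ps[n]? = some ps[n] := List.getElem?_eq_getElem hn'
    have hcast : ((n + 1 : Nat) : Int) = (n : Int) + 1 := by push_cast; ring
    rw [hcast, PySem.List.pyRange_one_succ_right (by positivity), List.foldl_append,
        ih (by omega) acc]
    rw [List.take_add_one, hget]
    simp only [List.foldl_cons, List.foldl_nil, Option.toList_some, List.foldl_append]
    rw [PySem.List.pyGet?_natCast, hget]
    simp only [Option.getD_some]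

theorem fold_toList (qs : List String) : ∀ (acc : String),
    (qs.foldl (fun r p => r ++ p ++ "/") acc).toList
    = acc.toList ++ qs.flatMap (fun p => p.toList ++ ['/']) := by
  induction qs with
  | nil => intro acc; simp
  | cons q rest ih =>
    intro acc
    simp [ih, String.toList_append]

theorem main_eq (s : String) : pathPreProcess s = pathPreProcess_alt s := by
  simp only [pathPreProcess, pathPreProcess_alt]
  have hst : (PySem.Str.replace s "\\" "/").toList = s.toList.map replC := by
    rw [PySem.Str.toList_replace]
    have h1 : ("\\" : String).toList = ['\\'] := by decide
    have h2 : ("/" : String).toList = ['/'] := by decide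
    rw [h1, h2, replace_eq]
  generalize hgen : PySem.Str.replace s "\\" "/" = st at hst
  obtain ⟨ps, hps, hmap⟩ : ∃ ps, PySem.Str.split? st "/" = some ps ∧
      ps.map String.toList = split2 s.toList [] := by
    have h := PySem.Str.split?_map st "/"
    have h2 : ("/" : String).toList = ['/'] := by decide
    rw [h2] at h
    rw [show PySem.Chars.split? st.toList ['/'] = some (PySem.Chars.splitOn st.toList ['/']) from
      by simp [PySem.Chars.split?]] at h
    cases hsp : PySem.Str.split? st "/" with
    | none => rw [hsp] at h; simp at h
    | some ps =>
      rw [hsp] at h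
      simp only [Option.map_some, Option.some.injEq] at h
      refine ⟨ps, rfl, ?_⟩
      rw [h, splitOn_eq, hst, split1_repl]
      rfl
  rw [hps]
  simp only [Option.getD_some]
  rw [scanB_eq]
  have hpsne : ps ≠ [] := by
    intro hnil
    rw [hnil] at hmap
    exact split2_ne_nil s.toList [] hmap.symm
  refine Prod.ext ?_ (Prod.ext ?_ ?_)
  · -- root
    apply String.toList_inj.mp
    rw [show ((ps.length : Int) - 1) = ((ps.length - 1 : Nat) : Int) from by
      have := List.length_pos_iff.mpr hpsne; omega]
    rw [fold_idx ps (ps.length - 1) (by omega), ← List.dropLast_eq_take, fold_toList]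
    have hx : (ps.dropLast).flatMap (fun p => p.toList ++ ['/'])
        = ((ps.map String.toList).dropLast).flatMap (fun cs => cs ++ ['/']) := by
      rw [← List.map_dropLast, List.flatMap_map]
    simp only [hx, hmap]
    simp
  · -- filename
    apply String.toList_inj.mp
    rw [PySem.List.pyGet?_neg_one]
    have hlast := List.getLast?_map (f := String.toList) (l := ps)
    rw [hmap] at hlast
    rw [List.getLast?_eq_some_getLast hpsne] at hlast
    rw [List.getLast?_eq_some_getLast (split2_ne_nil s.toList [])] at hlast
    simp only [Option.map_some, Option.some.injEq] at hlast
    rw [List.getLast?_eq_some_getLast hpsne, Option.getD_some, String.toList_ofList]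
    exact hlast.symm
  · -- inpname
    set fn := (PySem.List.pyGet? ps (-1)).getD "" with hfn
    have hfnl : fn.toList = (split2 s.toList []).getLast (split2_ne_nil s.toList []) := by
      rw [hfn, PySem.List.pyGet?_neg_one]
      have hlast := List.getLast?_map (f := String.toList) (l := ps)
      rw [hmap, List.getLast?_eq_some_getLast hpsne,
        List.getLast?_eq_some_getLast (split2_ne_nil s.toList [])] at hlast
      simp only [Option.map_some, Option.some.injEq] at hlast
      rw [List.getLast?_eq_some_getLast hpsne]
      simp only [Option.getD_some]
      exact hlast.symm
    obtain ⟨qs, hqs, hqmap⟩ : ∃ qs, PySem.Str.split? fn "." = some qs ∧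
        qs.map String.toList = split1 '.' fn.toList [] := by
      have h := PySem.Str.split?_map fn "."
      have h2 : ("." : String).toList = ['.'] := by decide
      rw [h2] at h
      rw [show PySem.Chars.split? fn.toList ['.'] = some (PySem.Chars.splitOn fn.toList ['.']) from
        by simp [PySem.Chars.split?]] at h
      cases hsp : PySem.Str.split? fn "." with
      | none => rw [hsp] at h; simp at h
      | some qs =>
        rw [hsp] at h
        simp only [Option.map_some, Option.some.injEq] at h
        exact ⟨qs, rfl, by rw [h, splitOn_eq]⟩
    rw [hqs]
    simp only [Option.getD_some]
    obtain ⟨t, ht⟩ := split1_dot_head fn.toList []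
    simp only [List.reverse_nil, List.nil_append] at ht
    rw [ht] at hqmap
    obtain ⟨q, qt, hq, hqhead, _⟩ := List.map_eq_cons_iff.mp hqmap
    apply String.toList_inj.mp
    rw [hq]
    rw [show PySem.List.pyGet? (q :: qt) 0 = some q from by
      rw [show (0 : Int) = ((0 : Nat) : Int) from rfl, PySem.List.pyGet?_natCast]; rfl]
    simp only [Option.getD_some]
    rw [hqhead, hfnl]
    simp

-- ===== VERDICT (by name: the statement is the Claim_ definition above) =====
theorem pathPreProcess_spec : Claim_equal_pathPreProcess := by
  intro s _
  exact main_eq s
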